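-- pv_equiv track=rewrite | github.com/Walavouchey/osu-wiki-tools | find-broken-wikilinks.py | find_comments
-- ===== SOURCE A (Python) =====
-- import typing
--
-- class Comment(typing.NamedTuple):
--     """
--     An HTML comment in a line.
--
--     These mark regions where parsed content should be discarded.
--
--     Example:
--         <!-- this is a comment -->
--         ^ start                  ^ end
--
--     Since an article is read and errors are printed line-by-line
--     (to protect against unexpected crashes), multiline comments are
--     expressed by setting the start and/or end values to -1, indicating
--     continuation of a comment from a previous line or to subsequent
--     lines respectively.
--
--     Examples:
--
--         A multiline comment continuing from a previous line -->
--         (start = -1)                                          ^ end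
--
--         <!-- A multiline comment continuing off to subsequent lines
--         ^ start                                          (end = -1)
--
--         A whole line marked as part of a multiline comment
--         (start = -1)                          (end = -1)
--     """
--
--     start: int
--     end: int
--
-- def find_comments(line: str, in_multiline: bool=False) -> typing.List[Comment]:
--     comments = []
--     index = 0
--     start = None
--
--     while True:
--         # don't start a comment if already in one
--         if not in_multiline:
--             start = line.find("<!--", index)
--             if start == -1:
--                 # no more comments
--                 return comments
--
--         end = line.find("-->", start or 0)
--
--         if end != -1:
--             # found the end of a comment
--             if in_multiline:
--                 # end of a multiline comment
--                 comments.append(Comment(start=-1, end=end + 2))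
--                 in_multiline = False
--             else:
--                 # whole inline comment
--                 comments.append(Comment(start=start, end=end + 2))
--             index = end + 3
--             continue
--         elif start is None:
--             # no comment start or end; the whole line is part of a comment
--             comments.append(Comment(start=-1, end=-1))
--             return comments
--         else:
--             # unmatched comment start: continuing to subsequent lines
--             comments.append(Comment(start=start, end=-1))
--             return comments
-- ===== SOURCE B (Python) =====
-- def find_comments(line, in_multiline=False):
--     # Precompute all marker positions, then pair them with a single walk.
--     starts = [i for i in range(len(line)) if line.startswith("<!--", i)]
--     ends = [i for i in range(len(line)) if line.startswith("-->", i)]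
--     if in_multiline:
--         if not ends:
--             return [(-1, -1)]
--         e = ends[0]
--         return [(-1, e + 2)] + _pair(starts, ends, e + 3)
--     return _pair(starts, ends, 0)
--
-- def _pair(starts, ends, idx):
--     out = []
--     for s in starts:
--         if s < idx:
--             continue
--         tail = [e for e in ends if e >= s]
--         if not tail:
--             out.append((s, -1))
--             break
--         e = tail[0]
--         out.append((s, e + 2))
--         idx = e + 3
--     return out
-- ===== Notes on version B (the rewrite author's own statement) =====
-- stated objective: alternative
-- what changed: Replaces A's find-based state machine (repeated str.find with index/start/in_multiline state mutated inside one while-True loop) by precomputing the ascending lists of all comment-start and comment-end marker positions up front and pairing them with a single walk over the start-position list.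
import Mathlib
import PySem

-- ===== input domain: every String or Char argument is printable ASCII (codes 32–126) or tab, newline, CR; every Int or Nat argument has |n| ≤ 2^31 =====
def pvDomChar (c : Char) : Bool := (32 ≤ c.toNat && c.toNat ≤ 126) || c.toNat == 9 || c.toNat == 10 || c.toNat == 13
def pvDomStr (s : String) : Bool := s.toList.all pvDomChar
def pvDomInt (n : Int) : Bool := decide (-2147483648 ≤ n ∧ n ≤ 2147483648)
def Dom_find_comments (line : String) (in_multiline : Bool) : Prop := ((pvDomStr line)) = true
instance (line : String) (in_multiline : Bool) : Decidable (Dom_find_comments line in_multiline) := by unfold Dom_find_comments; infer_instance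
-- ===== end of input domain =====

-- B precomputes the two comment-marker position lists and pairs them in one walk, instead of
-- A's repeated str.find state machine; alternative decomposition of the same cost.

-- ===== PORT A =====
def pvStartPat : List Char := ['<', '!', '-', '-']
def pvEndPat : List Char := ['-', '-', '>']

-- A's `while True` loop; fuel (length + 1) only makes the recursion structural, it is
-- proved sufficient below (the index strictly grows by ≥ 3 on every `continue`).
def pvLoopA (cs : List Char) : Nat → List (Int × Int) → Int → Option Int → Bool → List (Int × Int)
  | 0, comments, _, _, _ => comments
  | fuel + 1, comments, index, start?, im =>
    -- don't start a comment if already in one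
    let start? := if im = false then some (PySem.Chars.findFrom cs pvStartPat index none) else start?
    if im = false ∧ start? = some (-1) then
      -- no more comments
      comments
    else
      let e := PySem.Chars.findFrom cs pvEndPat (start?.getD 0) none   -- `start or 0`
      if e ≠ -1 then
        if im then pvLoopA cs fuel (comments ++ [(-1, e + 2)]) (e + 3) start? false
        else pvLoopA cs fuel (comments ++ [(start?.getD 0, e + 2)]) (e + 3) start? im
      else
        match start? with
        | none => comments ++ [(-1, -1)]
        | some s => comments ++ [(s, -1)]

def find_comments (line : String) (in_multiline : Bool) : List (Int × Int) :=
  pvLoopA line.toList (line.toList.length + 1) [] 0 none in_multiline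

-- ===== PORT B =====
-- occurrence positions of a marker: [i for i in range(len(line)) if line.startswith(pat, i)]
def pvOcc (cs pat : List Char) : List Nat :=
  (List.range cs.length).filter (fun i => PySem.Chars.startswith (cs.drop i) pat)

-- the `for s in starts` walk of Source B's _pair
def pvPair (ends : List Nat) : List Nat → Nat → List (Int × Int)
  | [], _ => []
  | s :: ss, idx =>
    if s < idx then pvPair ends ss idx
    else
      match ends.filter (fun e => decide (s ≤ e)) with
      | [] => [((s : Int), -1)]
      | e :: _ => ((s : Int), (e : Int) + 2) :: pvPair ends ss (e + 3)

def find_comments_alt (line : String) (in_multiline : Bool) : List (Int × Int) :=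
  let cs := line.toList
  let starts := pvOcc cs pvStartPat
  let ends := pvOcc cs pvEndPat
  if in_multiline then
    match ends with
    | [] => [(-1, -1)]
    | e :: _ => ((-1 : Int), (e : Int) + 2) :: pvPair ends starts (e + 3)
  else pvPair ends starts 0

-- ===== PRECONDITION & SPEC =====
def Spec_find_comments (line : String) (in_multiline : Bool) (out : List (Int × Int)) : Prop := out = find_comments_alt line in_multiline
instance (line : String) (in_multiline : Bool) (out : List (Int × Int)) : Decidable (Spec_find_comments line in_multiline out) := by unfold Spec_find_comments; infer_instance

-- ===== CLAIM (what is proved, stated in full; the proofs are below) =====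
def Claim_equal_find_comments : Prop := ∀ (line : String) (in_multiline : Bool), Dom_find_comments line in_multiline → Spec_find_comments line in_multiline (find_comments line in_multiline)

-- ===== LEMMAS AND PROOFS =====

lemma pv_find_range (n : Nat) (f : Nat → Bool) (p0 : Nat) (h1 : p0 < n) (h3 : f p0 = true)
    (h4 : ∀ p < p0, f p = false) : (List.range n).find? f = some p0 := by
  induction n with
  | zero => omega
  | succ m ih =>
    rw [List.range_succ, List.find?_append]
    rcases Nat.lt_or_ge p0 m with hlt | hge
    · rw [ih hlt]; rfl
    · have : p0 = m := by omega
      subst this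
      have : (List.range p0).find? f = none := by
        rw [List.find?_eq_none]
        intro x hx
        simp only [List.mem_range] at hx
        simp [h4 x hx]
      simp [this, h3]

-- head of a doubly-filtered range is the least p0 ≥ k with q p0
lemma pv_head_ff (n k p0 : Nat) (q : Nat → Bool) (h1 : p0 < n) (h2 : k ≤ p0) (h3 : q p0 = true)
    (h4 : ∀ p, k ≤ p → p < p0 → q p = false) :
    (((List.range n).filter q).filter (fun p => decide (k ≤ p))).head? = some p0 := by
  rw [List.filter_filter, List.head?_filter]
  apply pv_find_range n _ p0 h1
  · simp [h2, h3]
  · intro p hp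
    by_cases hk : k ≤ p
    · simp [h4 p hk hp]
    · simp [hk]

-- no p ≥ k in range n satisfies q → the double filter is empty
lemma pv_ff_nil (n k : Nat) (q : Nat → Bool) (h : ∀ p, k ≤ p → p < n → q p = false) :
    ((List.range n).filter q).filter (fun p => decide (k ≤ p)) = [] := by
  rw [List.filter_filter, List.filter_eq_nil_iff]
  intro p hp
  simp only [List.mem_range] at hp
  by_cases hk : k ≤ p
  · simp [h p hk hp]
  · simp [hk]

-- str.find(pat, k) = -1  ↔  no occurrence position ≥ k
lemma pv_L1_none (cs pat : List Char) (k : Nat) (hk : k ≤ cs.length)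
    (h : PySem.Chars.findFrom cs pat (k : Int) none = -1) :
    (pvOcc cs pat).filter (fun p => decide (k ≤ p)) = [] := by
  rw [PySem.Chars.findFrom_natCast_eq_neg_one_iff cs pat k hk] at h
  apply pv_ff_nil
  intro p hkp hpn
  rw [Bool.eq_false_iff]
  intro hsw
  rw [PySem.Chars.startswith_iff] at hsw
  apply h
  have hd : cs.drop p = (cs.drop k).drop (p - k) := by rw [List.drop_drop]; congr 1; omega
  rw [hd] at hsw
  exact hsw.isInfix.trans (List.drop_suffix _ _).isInfix

-- str.find(pat, k) ≥ 0 is the first occurrence position ≥ k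
lemma pv_L1_some (cs pat : List Char) (hp : pat ≠ []) (k : Nat) (hk : k ≤ cs.length)
    (h : PySem.Chars.findFrom cs pat (k : Int) none ≠ -1) :
    ((pvOcc cs pat).filter (fun p => decide (k ≤ p))).head? =
      some (PySem.Chars.findFrom cs pat (k : Int) none).toNat := by
  obtain ⟨hkf, hpre, hmin⟩ := PySem.Chars.findFrom_natCast_spec cs pat k hk h
  set f := PySem.Chars.findFrom cs pat (k : Int) none with hf
  have hlen : pat.length ≤ cs.length - f.toNat := by simpa using hpre.length_le
  have hpat1 : 0 < pat.length := List.length_pos_of_ne_nil hp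
  have h1 : f.toNat < cs.length := by omega
  have h2 : k ≤ f.toNat := by omega
  apply pv_head_ff _ _ _ _ h1 h2
  · rw [PySem.Chars.startswith_iff]; exact hpre
  · intro p hkp hpf
    rw [Bool.eq_false_iff]
    intro hsw
    exact hmin p hkp hpf ((PySem.Chars.startswith_iff _ _).mp hsw)

-- pvPair ignores starts below i when the index is already ≥ i
lemma pv_pair_filter (E S : List Nat) : ∀ (i j : Nat), i ≤ j →
    pvPair E (S.filter (fun p => decide (i ≤ p))) j = pvPair E S j := by
  induction S with
  | nil => intro i j h; simp [pvPair]
  | cons s ss ih =>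
    intro i j hij
    by_cases his : i ≤ s
    · rw [List.filter_cons, if_pos (by simpa using his)]
      by_cases hsj : s < j
      · rw [pvPair, pvPair, if_pos hsj, if_pos hsj]
        exact ih i j hij
      · rw [pvPair, pvPair, if_neg hsj, if_neg hsj]
        cases hE : E.filter (fun e => decide (s ≤ e)) with
        | nil => rfl
        | cons e rest =>
          exact congrArg (fun t => ((s : Int), (e : Int) + 2) :: t) (ih i (e + 3) (by
            have : e ∈ E.filter (fun e => decide (s ≤ e)) := by rw [hE]; exact List.mem_cons_self
            have := (List.mem_filter.mp this).2
            simp at this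
            omega))
    · rw [List.filter_cons, if_neg (by simpa using his)]
      rw [pvPair, if_pos (by omega)]
      exact ih i j hij

lemma pv_filter_filter (S : List Nat) (i j : Nat) (h : i ≤ j) :
    (S.filter (fun p => decide (i ≤ p))).filter (fun p => decide (j ≤ p)) =
      S.filter (fun p => decide (j ≤ p)) := by
  rw [List.filter_filter]
  apply List.filter_congr
  intro p _
  by_cases hj : j ≤ p
  · have : i ≤ p := le_trans h hj
    simp [hj, this]
  · simp [hj]

-- main loop correspondence (A's loop with in_multiline already false)
lemma pv_main (cs : List Char) (fuel : Nat) :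
    ∀ (k : Nat) (comments : List (Int × Int)) (start? : Option Int),
      k ≤ cs.length → cs.length < k + 3 * fuel →
      pvLoopA cs fuel comments (k : Int) start? false =
        comments ++ pvPair (pvOcc cs pvEndPat)
          ((pvOcc cs pvStartPat).filter (fun p => decide (k ≤ p))) k := by
  induction fuel with
  | zero => intro k _ _ hk hlt; omega
  | succ fuel ih =>
    intro k comments start? hk hlt
    rw [pvLoopA]
    simp only [if_true, true_and, Option.some.injEq, Option.getD_some,
      Bool.false_eq_true, if_false]
    by_cases hf : PySem.Chars.findFrom cs pvStartPat ((k : Nat) : Int) none = -1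
    · rw [if_pos hf, pv_L1_none cs pvStartPat k hk hf, pvPair]
      simp
    · rw [if_neg hf]
      obtain ⟨hkf, hpreS, _⟩ := PySem.Chars.findFrom_natCast_spec cs pvStartPat k hk hf
      set f := PySem.Chars.findFrom cs pvStartPat ((k : Nat) : Int) none with hfdef
      have hf0 : ((f.toNat : Nat) : Int) = f := Int.toNat_of_nonneg (by omega)
      have hflen : f.toNat + 4 ≤ cs.length := by
        have := hpreS.length_le
        simp [pvStartPat] at this
        omega
      have hShead := pv_L1_some cs pvStartPat (by simp [pvStartPat]) k hk hf
      cases hS : (pvOcc cs pvStartPat).filter (fun p => decide (k ≤ p)) with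
      | nil => rw [hS] at hShead; simp at hShead
      | cons s ss =>
        rw [hS] at hShead
        simp only [List.head?_cons, Option.some.injEq] at hShead
        subst hShead
        rw [← hf0]
        by_cases he : PySem.Chars.findFrom cs pvEndPat ((f.toNat : Nat) : Int) none = -1
        · rw [if_neg (not_not_intro he), pvPair, if_neg (by omega),
            pv_L1_none cs pvEndPat f.toNat (by omega) he]
        · rw [if_pos he]
          obtain ⟨hfe, hpreE, _⟩ :=
            PySem.Chars.findFrom_natCast_spec cs pvEndPat f.toNat (by omega) he
          set e := PySem.Chars.findFrom cs pvEndPat ((f.toNat : Nat) : Int) none with hedef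
          have he0 : ((e.toNat : Nat) : Int) = e := Int.toNat_of_nonneg (by omega)
          have helen : e.toNat + 3 ≤ cs.length := by
            have := hpreE.length_le
            simp [pvEndPat] at this
            omega
          have hEhead := pv_L1_some cs pvEndPat (by simp [pvEndPat]) f.toNat (by omega) he
          cases hE : (pvOcc cs pvEndPat).filter (fun p => decide (f.toNat ≤ p)) with
          | nil => rw [hE] at hEhead; simp at hEhead
          | cons e' rest =>
            rw [hE] at hEhead
            simp only [List.head?_cons, Option.some.injEq] at hEhead
            subst hEhead
            have harg : (e + 3 : Int) = (((e.toNat + 3 : Nat)) : Int) := by omega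
            rw [harg, ih (e.toNat + 3) _ _ (by omega) (by omega)]
            rw [pvPair, if_neg (by omega), hE]
            show comments ++ [((f.toNat : Int), e + 2)] ++
                pvPair (pvOcc cs pvEndPat)
                  ((pvOcc cs pvStartPat).filter (fun p => decide (e.toNat + 3 ≤ p)))
                  (e.toNat + 3) =
              comments ++ (((f.toNat : Int), ((e.toNat : Nat) : Int) + 2) ::
                pvPair (pvOcc cs pvEndPat) ss (e.toNat + 3))
            have htail : pvPair (pvOcc cs pvEndPat)
                ((pvOcc cs pvStartPat).filter (fun p => decide (e.toNat + 3 ≤ p)))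
                (e.toNat + 3) = pvPair (pvOcc cs pvEndPat) ss (e.toNat + 3) := by
              rw [← pv_filter_filter (pvOcc cs pvStartPat) k (e.toNat + 3) (by omega), hS,
                List.filter_cons, if_neg (by simp; omega)]
              exact pv_pair_filter (pvOcc cs pvEndPat) ss (e.toNat + 3) (e.toNat + 3) le_rfl
            rw [htail, he0]
            simp

-- ===== VERDICT (by name: the statement is the Claim_ definition above) =====
theorem find_comments_spec : Claim_equal_find_comments := by
  intro line im _
  unfold Spec_find_comments find_comments find_comments_alt
  set cs := line.toList with hcs
  cases im with
  | false =>
    simp only [Bool.false_eq_true, if_false]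
    rw [show (0 : Int) = ((0 : Nat) : Int) from rfl,
      pv_main cs (cs.length + 1) 0 [] none (by omega) (by omega)]
    simp only [List.nil_append]
    congr 1
    apply List.filter_eq_self.mpr
    intro p _
    simp
  | true =>
    simp only [if_true]
    rw [pvLoopA]
    simp only [reduceCtorEq, false_and, if_false, Option.getD_none,
      Bool.true_eq_false, if_true]
    rw [show (0 : Int) = ((0 : Nat) : Int) from rfl]
    by_cases he : PySem.Chars.findFrom cs pvEndPat (((0 : Nat)) : Int) none = -1
    · have hEnil : pvOcc cs pvEndPat = [] := by
        have := pv_L1_none cs pvEndPat 0 (by omega) he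
        rwa [List.filter_eq_self.mpr (by intro p _; simp)] at this
      rw [if_neg (not_not_intro he), hEnil]
      simp
    · rw [if_pos he]
      obtain ⟨hfe, hpreE, _⟩ := PySem.Chars.findFrom_natCast_spec cs pvEndPat 0 (by omega) he
      set e := PySem.Chars.findFrom cs pvEndPat (((0 : Nat)) : Int) none with hedef
      have he0 : ((e.toNat : Nat) : Int) = e := Int.toNat_of_nonneg (by omega)
      have helen : e.toNat + 3 ≤ cs.length := by
        have := hpreE.length_le
        simp [pvEndPat] at this
        omega
      have hEhead := pv_L1_some cs pvEndPat (by simp [pvEndPat]) 0 (by omega) he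
      rw [List.filter_eq_self.mpr (by intro p _; simp)] at hEhead
      cases hE : pvOcc cs pvEndPat with
      | nil => rw [hE] at hEhead; simp at hEhead
      | cons e' rest =>
        rw [hE] at hEhead
        simp only [List.head?_cons, Option.some.injEq] at hEhead
        subst hEhead
        have harg : (e + 3 : Int) = (((e.toNat + 3 : Nat)) : Int) := by omega
        rw [harg, pv_main cs cs.length (e.toNat + 3) ([] ++ [(-1, e + 2)]) none (by omega)
          (by omega)]
        show [] ++ [(-1, e + 2)] ++
            pvPair (pvOcc cs pvEndPat)
              ((pvOcc cs pvStartPat).filter (fun p => decide (e.toNat + 3 ≤ p)))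
              (e.toNat + 3) =
          ((-1 : Int), ((e.toNat : Nat) : Int) + 2) ::
            pvPair (e.toNat :: rest) (pvOcc cs pvStartPat) (e.toNat + 3)
        rw [pv_pair_filter (pvOcc cs pvEndPat) (pvOcc cs pvStartPat) (e.toNat + 3)
          (e.toNat + 3) le_rfl]
        have hc : (e.toNat :: rest) = pvOcc cs pvEndPat := hE.symm
        rw [hc, he0]
        simp
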